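-- pv_equiv track=rewrite | github.com/new-puzzle/AI-Learning-Project | utils/template_helpers.py | _generate_project_subdivisions
-- ===== SOURCE A (Python) =====
-- from typing import List, Dict
--
-- def _generate_project_subdivisions(name: str, description: str, category: str, level: str) -> List[str]:
--     """Generate subdivisions for project goals - phase/component-based"""
--     subdivisions = []
--     name_lower = name.lower()
--
--     # Tech projects
--     if 'tech' in category.lower() or any(term in name_lower for term in ['app', 'website', 'saas', 'software', 'extension']):
--         if level == 'Beginner':
--             subdivisions = ['Basic Planning', 'Simple Development', 'Basic Testing', 'Simple Launch']
--         elif level == 'Intermediate':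
--             subdivisions = ['Planning & Design', 'Development', 'Testing & Refinement', 'Launch & Marketing']
--         else:
--             subdivisions = ['Advanced Planning & Architecture', 'Advanced Development', 'Comprehensive Testing', 'Strategic Launch & Marketing']
--
--     # Content projects
--     elif any(term in name_lower for term in ['youtube', 'podcast', 'blog', 'newsletter', 'course']):
--         if level == 'Beginner':
--             subdivisions = ['Content Basics', 'Platform Setup Basics', 'Basic Marketing', 'Getting Started']
--         elif level == 'Intermediate':
--             subdivisions = ['Content Creation', 'Platform Setup', 'Marketing & Growth', 'Monetization']
--         else:
--             subdivisions = ['Advanced Content Strategy', 'Optimized Platform Setup', 'Advanced Marketing', 'Advanced Monetization']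
--
--     # Business projects
--     elif any(term in name_lower for term in ['business', 'store', 'e-commerce', 'product']):
--         if level == 'Beginner':
--             subdivisions = ['Basic Planning', 'Simple Setup', 'Basic Marketing', 'Simple Launch']
--         elif level == 'Intermediate':
--             subdivisions = ['Planning & Research', 'Setup & Development', 'Marketing', 'Launch & Sales']
--         else:
--             subdivisions = ['Advanced Planning & Strategy', 'Advanced Setup', 'Strategic Marketing', 'Advanced Launch & Sales']
--
--     # General
--     else:
--         if level == 'Beginner':
--             subdivisions = ['Basic Planning', 'Simple Development', 'Basic Testing', 'Simple Launch']
--         elif level == 'Intermediate':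
--             subdivisions = ['Planning', 'Development', 'Testing', 'Launch']
--         else:
--             subdivisions = ['Advanced Planning', 'Advanced Development', 'Comprehensive Testing', 'Strategic Launch']
--
--     return subdivisions
-- ===== SOURCE B (Python) =====
-- from typing import List
--
-- # Flat priority rule table: (needle, field, group).  group indices: 0 tech, 1 content, 2 business, 3 general.
-- _RULES = [
--     ('tech', 'category', 0),
--     ('app', 'name', 0), ('website', 'name', 0), ('saas', 'name', 0), ('software', 'name', 0), ('extension', 'name', 0),
--     ('youtube', 'name', 1), ('podcast', 'name', 1), ('blog', 'name', 1), ('newsletter', 'name', 1), ('course', 'name', 1),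
--     ('business', 'name', 2), ('store', 'name', 2), ('e-commerce', 'name', 2), ('product', 'name', 2),
-- ]
--
-- _TIERS = {'Beginner': 0, 'Intermediate': 1}
--
-- # Flat table, row-major: entry 3*group + tier.
-- _TABLE = [
--     ['Basic Planning', 'Simple Development', 'Basic Testing', 'Simple Launch'],
--     ['Planning & Design', 'Development', 'Testing & Refinement', 'Launch & Marketing'],
--     ['Advanced Planning & Architecture', 'Advanced Development', 'Comprehensive Testing', 'Strategic Launch & Marketing'],
--     ['Content Basics', 'Platform Setup Basics', 'Basic Marketing', 'Getting Started'],
--     ['Content Creation', 'Platform Setup', 'Marketing & Growth', 'Monetization'],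
--     ['Advanced Content Strategy', 'Optimized Platform Setup', 'Advanced Marketing', 'Advanced Monetization'],
--     ['Basic Planning', 'Simple Setup', 'Basic Marketing', 'Simple Launch'],
--     ['Planning & Research', 'Setup & Development', 'Marketing', 'Launch & Sales'],
--     ['Advanced Planning & Strategy', 'Advanced Setup', 'Strategic Marketing', 'Advanced Launch & Sales'],
--     ['Basic Planning', 'Simple Development', 'Basic Testing', 'Simple Launch'],
--     ['Planning', 'Development', 'Testing', 'Launch'],
--     ['Advanced Planning', 'Advanced Development', 'Comprehensive Testing', 'Strategic Launch'],
-- ]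
--
-- def _generate_project_subdivisions(name: str, description: str, category: str, level: str) -> List[str]:
--     hay = {'name': name.lower(), 'category': category.lower()}
--     group = min((g for needle, field, g in _RULES if needle in hay[field]), default=3)
--     tier = _TIERS.get(level, 2)
--     return list(_TABLE[3 * group + tier])
-- ===== Notes on version B (the rewrite author's own statement) =====
-- stated objective: alternative
-- what changed: Replaces the twelve-branch short-circuit if/elif tree by a flat priority rule table scanned once: the group is the minimum group index over ALL matching (needle, field, group) rules (min over a generator, no ordered early exit), and the result is read from a flat 12-row table at index 3*group+tier.
import Mathlib
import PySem

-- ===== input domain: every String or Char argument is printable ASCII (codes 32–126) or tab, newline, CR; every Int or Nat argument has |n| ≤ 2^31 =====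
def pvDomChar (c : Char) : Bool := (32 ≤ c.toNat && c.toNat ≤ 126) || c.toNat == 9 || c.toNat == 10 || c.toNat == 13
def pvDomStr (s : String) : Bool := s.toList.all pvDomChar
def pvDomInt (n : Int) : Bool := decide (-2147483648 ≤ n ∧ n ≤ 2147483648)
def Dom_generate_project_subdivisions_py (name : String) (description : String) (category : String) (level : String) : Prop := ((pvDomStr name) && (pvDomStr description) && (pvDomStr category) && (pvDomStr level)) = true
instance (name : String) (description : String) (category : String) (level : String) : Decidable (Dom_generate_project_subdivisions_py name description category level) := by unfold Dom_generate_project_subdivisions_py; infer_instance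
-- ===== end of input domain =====

-- B replaces A's twelve-branch nested if/elif by a flat priority rule table: group = min matching rule's group index, result = flat table at 3*group+tier (alternative, same cost; return value only).


-- ===== PORT A =====
def generate_project_subdivisions_py (name : String) (description : String) (category : String) (level : String) : List String :=
  let name_lower := PySem.Str.lower name
  if PySem.Str.isIn "tech" (PySem.Str.lower category)
     || (["app", "website", "saas", "software", "extension"].any (fun term => PySem.Str.isIn term name_lower)) then
    if level == "Beginner" then
      ["Basic Planning", "Simple Development", "Basic Testing", "Simple Launch"]
    else if level == "Intermediate" then
      ["Planning & Design", "Development", "Testing & Refinement", "Launch & Marketing"]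
    else
      ["Advanced Planning & Architecture", "Advanced Development", "Comprehensive Testing", "Strategic Launch & Marketing"]
  else if ["youtube", "podcast", "blog", "newsletter", "course"].any (fun term => PySem.Str.isIn term name_lower) then
    if level == "Beginner" then
      ["Content Basics", "Platform Setup Basics", "Basic Marketing", "Getting Started"]
    else if level == "Intermediate" then
      ["Content Creation", "Platform Setup", "Marketing & Growth", "Monetization"]
    else
      ["Advanced Content Strategy", "Optimized Platform Setup", "Advanced Marketing", "Advanced Monetization"]
  else if ["business", "store", "e-commerce", "product"].any (fun term => PySem.Str.isIn term name_lower) then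
    if level == "Beginner" then
      ["Basic Planning", "Simple Setup", "Basic Marketing", "Simple Launch"]
    else if level == "Intermediate" then
      ["Planning & Research", "Setup & Development", "Marketing", "Launch & Sales"]
    else
      ["Advanced Planning & Strategy", "Advanced Setup", "Strategic Marketing", "Advanced Launch & Sales"]
  else
    if level == "Beginner" then
      ["Basic Planning", "Simple Development", "Basic Testing", "Simple Launch"]
    else if level == "Intermediate" then
      ["Planning", "Development", "Testing", "Launch"]
    else
      ["Advanced Planning", "Advanced Development", "Comprehensive Testing", "Strategic Launch"]

-- ===== PORT B =====
-- Flat priority rule table: (needle, useCategoryField, group). 0 tech, 1 content, 2 business, 3 general.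
def pvRules : List (String × Bool × Nat) :=
  [("tech", true, 0),
   ("app", false, 0), ("website", false, 0), ("saas", false, 0), ("software", false, 0), ("extension", false, 0),
   ("youtube", false, 1), ("podcast", false, 1), ("blog", false, 1), ("newsletter", false, 1), ("course", false, 1),
   ("business", false, 2), ("store", false, 2), ("e-commerce", false, 2), ("product", false, 2)]

-- Flat table, row-major: entry 3*group + tier.
def pvTable : List (List String) :=
  [["Basic Planning", "Simple Development", "Basic Testing", "Simple Launch"],
   ["Planning & Design", "Development", "Testing & Refinement", "Launch & Marketing"],
   ["Advanced Planning & Architecture", "Advanced Development", "Comprehensive Testing", "Strategic Launch & Marketing"],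
   ["Content Basics", "Platform Setup Basics", "Basic Marketing", "Getting Started"],
   ["Content Creation", "Platform Setup", "Marketing & Growth", "Monetization"],
   ["Advanced Content Strategy", "Optimized Platform Setup", "Advanced Marketing", "Advanced Monetization"],
   ["Basic Planning", "Simple Setup", "Basic Marketing", "Simple Launch"],
   ["Planning & Research", "Setup & Development", "Marketing", "Launch & Sales"],
   ["Advanced Planning & Strategy", "Advanced Setup", "Strategic Marketing", "Advanced Launch & Sales"],
   ["Basic Planning", "Simple Development", "Basic Testing", "Simple Launch"],
   ["Planning", "Development", "Testing", "Launch"],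
   ["Advanced Planning", "Advanced Development", "Comprehensive Testing", "Strategic Launch"]]

def pvTiers : PySem.Dict String Nat := PySem.Dict.ofList [("Beginner", 0), ("Intermediate", 1)]

def generate_project_subdivisions_py_alt (name : String) (description : String) (category : String) (level : String) : List String :=
  let nl := PySem.Str.lower name
  let cl := PySem.Str.lower category
  -- min((g for needle, field, g in _RULES if needle in hay[field]), default=3) as a fold with min
  let group := pvRules.foldl (fun acc r => if PySem.Str.isIn r.1 (if r.2.1 then cl else nl) then min acc r.2.2 else acc) 3
  let tier := PySem.Dict.getD pvTiers level 2
  pvTable.getD (3 * group + tier) []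

-- ===== PRECONDITION & SPEC =====
def Spec_generate_project_subdivisions_py (name : String) (description : String) (category : String) (level : String) (out : List String) : Prop := out = generate_project_subdivisions_py_alt name description category level
instance (name : String) (description : String) (category : String) (level : String) (out : List String) : Decidable (Spec_generate_project_subdivisions_py name description category level out) := by unfold Spec_generate_project_subdivisions_py; infer_instance

-- ===== CLAIM (what is proved, stated in full; the proofs are below) =====
def Claim_equal_generate_project_subdivisions_py : Prop := ∀ (name : String) (description : String) (category : String) (level : String), Dom_generate_project_subdivisions_py name description category level → Spec_generate_project_subdivisions_py name description category level (generate_project_subdivisions_py name description category level)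

-- ===== LEMMAS AND PROOFS =====

-- A min-fold over a run of rules sharing one group index g collapses to: if any rule matches, min acc g, else acc.
theorem pv_fold_seg (nl cl : String) (g : Nat) (rs : List (String × Bool × Nat))
    (h : ∀ r ∈ rs, r.2.2 = g) (acc : Nat) :
    rs.foldl (fun acc r => if PySem.Str.isIn r.1 (if r.2.1 then cl else nl) then min acc r.2.2 else acc) acc
      = if rs.any (fun r => PySem.Str.isIn r.1 (if r.2.1 then cl else nl)) then min acc g else acc := by
  induction rs generalizing acc with
  | nil => simp
  | cons r rs ih =>
    have hg : r.2.2 = g := h r (by simp)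
    have htail : ∀ x ∈ rs, x.2.2 = g := fun x hx => h x (by simp [hx])
    simp only [List.foldl_cons, List.any_cons]
    by_cases hr : PySem.Str.isIn r.1 (if r.2.1 then cl else nl) = true
    · simp only [hr, if_true, Bool.true_or, hg, ih htail]
      by_cases ha : rs.any (fun r => PySem.Str.isIn r.1 (if r.2.1 then cl else nl)) = true <;> simp
    · rw [Bool.not_eq_true] at hr
      simp only [hr, Bool.false_eq_true, if_false, Bool.false_or]
      exact ih htail acc

theorem pv_group_eq (nl cl : String) :
    pvRules.foldl (fun acc r => if PySem.Str.isIn r.1 (if r.2.1 then cl else nl) then min acc r.2.2 else acc) 3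
    = (if PySem.Str.isIn "tech" cl
          || (["app", "website", "saas", "software", "extension"].any (fun t => PySem.Str.isIn t nl)) then 0
       else if ["youtube", "podcast", "blog", "newsletter", "course"].any (fun t => PySem.Str.isIn t nl) then 1
       else if ["business", "store", "e-commerce", "product"].any (fun t => PySem.Str.isIn t nl) then 2
       else 3) := by
  have hsplit : pvRules =
      [("tech", true, 0), ("app", false, 0), ("website", false, 0), ("saas", false, 0), ("software", false, 0), ("extension", false, 0)]
      ++ [("youtube", false, 1), ("podcast", false, 1), ("blog", false, 1), ("newsletter", false, 1), ("course", false, 1)]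
      ++ [("business", false, 2), ("store", false, 2), ("e-commerce", false, 2), ("product", false, 2)] := rfl
  rw [hsplit, List.foldl_append, List.foldl_append]
  rw [pv_fold_seg nl cl 2 _ (by decide), pv_fold_seg nl cl 1 _ (by decide), pv_fold_seg nl cl 0 _ (by decide)]
  simp only [List.any_cons, List.any_nil, Bool.or_false, Bool.false_eq_true, if_false, if_true]
  split_ifs <;> decide

theorem pv_tier_eq (level : String) :
    PySem.Dict.getD pvTiers level 2
      = if level == "Beginner" then 0 else if level == "Intermediate" then 1 else 2 := by
  have h : pvTiers = (PySem.Dict.empty.insert "Beginner" 0).insert "Intermediate" 1 := by decide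
  rw [h, PySem.Dict.getD_insert, PySem.Dict.getD_insert]
  by_cases hB : level = "Beginner" <;> by_cases hI : level = "Intermediate" <;>
    simp_all [PySem.Dict.getD_empty]

-- ===== VERDICT (by name: the statement is the Claim_ definition above) =====
theorem generate_project_subdivisions_py_spec : Claim_equal_generate_project_subdivisions_py := by
  intro name description category level _
  unfold Spec_generate_project_subdivisions_py
  simp only [generate_project_subdivisions_py, generate_project_subdivisions_py_alt]
  rw [pv_group_eq (PySem.Str.lower name) (PySem.Str.lower category), pv_tier_eq]
  cases h1 : (PySem.Str.isIn "tech" (PySem.Str.lower category)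
      || (["app", "website", "saas", "software", "extension"].any
            (fun t => PySem.Str.isIn t (PySem.Str.lower name)))) <;>
  cases h2 : (["youtube", "podcast", "blog", "newsletter", "course"].any
            (fun t => PySem.Str.isIn t (PySem.Str.lower name))) <;>
  cases h3 : (["business", "store", "e-commerce", "product"].any
            (fun t => PySem.Str.isIn t (PySem.Str.lower name))) <;>
  cases hB : (level == "Beginner") <;>
  cases hI : (level == "Intermediate") <;>
  simp [pvTable]
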